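-- pv_equiv track=rewrite | github.com/tunelko/ctf-2026 | DiceCTF2026/crypto/plane-or-exchange/solve.py | evaluate_alexander
-- ===== SOURCE A (Python) =====
-- def sweep(ap):
--     l = len(ap)
--     current_row = [0] * l
--     matrix = []
--     for pair in ap:
--         c1, c2 = sorted(pair)
--         diff = pair[1] - pair[0]
--         s = 1 if diff > 0 else (-1 if diff < 0 else 0)
--         for c in range(c1, c2):
--             current_row[c] += s
--         matrix.append(list(current_row))
--     return matrix
--
-- def mine(point):
--     x, o = point
--     return sweep([*zip(x, o)])
--
-- def integer_det(mat):
--     n = len(mat)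
--     M = [row[:] for row in mat]
--     sign = 1
--     prev = 1
--     for k in range(n - 1):
--         if M[k][k] == 0:
--             for i in range(k + 1, n):
--                 if M[i][k] != 0:
--                     M[k], M[i] = M[i], M[k]
--                     sign *= -1
--                     break
--             else:
--                 return 0
--         for i in range(k + 1, n):
--             for j in range(k + 1, n):
--                 M[i][j] = (M[k][k] * M[i][j] - M[i][k] * M[k][j]) // prev
--             M[i][k] = 0
--         prev = M[k][k]
--     return sign * M[n-1][n-1]
--
-- def evaluate_alexander(point, u_val):
--     """Evaluate Alexander polynomial at u=1/t using exact integer arithmetic."""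
--     m = mine(point)
--     n = len(m)
--     row_mins = [min(row) for row in m]
--     shifted = [[val - row_mins[i] for val in row] for i, row in enumerate(m)]
--     mat = [[u_val**s for s in row] for row in shifted]
--     det_val = integer_det(mat)
--     S = sum(row_mins)
--     numerator = det_val * u_val**(S + n - 1)
--     denominator = (u_val - 1)**(n - 1)
--     return numerator // denominator
-- ===== SOURCE B (Python) =====
-- def _pivot(rows, sign):
--     # bring a row with nonzero leading entry to the front (None = singular)
--     if rows[0][0] == 0:
--         r = next((i for i, row in enumerate(rows) if row[0] != 0), None)
--         if r is None:
--             return None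
--         rows = rows[:]
--         rows[0], rows[r] = rows[r], rows[0]
--         sign = -sign
--     return rows, sign
--
--
-- def _chio(rows, prev, sign):
--     # Chio/Bareiss pivotal condensation: shrink the matrix by one row and
--     # column per step instead of updating an n x n matrix in place.
--     while len(rows) != 1:
--         p = _pivot(rows, sign)
--         if p is None:
--             return 0
--         rows, sign = p
--         top = rows[0]
--         rows, prev = [[(top[0] * row[j] - row[0] * top[j]) // prev
--                        for j in range(1, len(row))]
--                       for row in rows[1:]], top[0]
--     return sign * rows[0][0]
--
--
-- def evaluate_alexander(point, u_val):
--     """Evaluate Alexander polynomial at u=1/t using exact integer arithmetic."""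
--     pairs = list(zip(point[0], point[1]))
--     n = len(pairs)
--     row = [0] * n
--     mat = []
--     S = 0
--     for a, b in pairs:
--         s = (b > a) - (b < a)
--         for c in range(min(a, b), max(a, b)):
--             row[c] += s
--         mn = min(row)
--         S += mn
--         mat.append([u_val ** (v - mn) for v in row])
--     det = _chio(mat, 1, 1)
--     return det * u_val ** (S + n - 1) // (u_val - 1) ** (n - 1)
-- ===== Notes on version B (the rewrite author's own statement) =====
-- stated objective: alternative
-- what changed: The determinant is computed by recursive Chio/Bareiss pivotal condensation on immutable, shrinking matrices (one row/column removed per step) instead of in-place fraction-free Gaussian elimination with index loops over a mutable n x n matrix, and the sweep/row-min/shift/power pipeline is fused into a single pass with running minimum-sum instead of four separate comprehensions.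
import Mathlib
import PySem

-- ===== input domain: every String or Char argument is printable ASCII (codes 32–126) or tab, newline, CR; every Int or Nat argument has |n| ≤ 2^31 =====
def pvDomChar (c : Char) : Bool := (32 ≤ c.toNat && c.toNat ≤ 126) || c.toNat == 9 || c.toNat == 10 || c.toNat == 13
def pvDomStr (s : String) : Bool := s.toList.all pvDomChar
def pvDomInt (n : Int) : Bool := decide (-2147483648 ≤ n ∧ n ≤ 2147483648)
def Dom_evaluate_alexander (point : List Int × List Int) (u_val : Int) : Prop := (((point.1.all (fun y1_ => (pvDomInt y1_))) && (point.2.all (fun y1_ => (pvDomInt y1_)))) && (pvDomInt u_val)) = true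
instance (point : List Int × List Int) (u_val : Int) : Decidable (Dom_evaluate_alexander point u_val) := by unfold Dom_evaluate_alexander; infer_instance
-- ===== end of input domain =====

-- B recomputes the determinant by recursive Chio/Bareiss condensation on shrinking
-- immutable matrices (instead of A's in-place index-loop elimination) and fuses the
-- sweep/min/shift/power pipeline into one pass; same values, same asymptotic cost.

-- ===== PORT A =====

-- M[i][j] read / write (indices produced by the loops are in range wherever Python runs)
def pvGetM (M : List (List Int)) (i j : Nat) : Int := (M.getD i []).getD j 0

def pvSetM (M : List (List Int)) (i j : Nat) (v : Int) : List (List Int) :=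
  M.set i ((M.getD i []).set j v)

-- `1 if diff > 0 else (-1 if diff < 0 else 0)`
def pvSgn (d : Int) : Int := if d > 0 then 1 else if d < 0 then -1 else 0

-- `current_row[c] += s` (Python raises IndexError out of range; excluded by Pre_, pySetD is then a no-op)
def pvAddAt (row : List Int) (c s : Int) : List Int :=
  PySem.List.pySetD row c (PySem.List.pyGetD row c 0 + s)

def pvSweep (ap : List (Int × Int)) : List (List Int) :=
  let l := ap.length
  (ap.foldl (fun (st : List Int × List (List Int)) pair =>
      let c1 := min pair.1 pair.2      -- c1, c2 = sorted(pair)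
      let c2 := max pair.1 pair.2
      let s := pvSgn (pair.2 - pair.1)
      let row := (PySem.List.pyRange c1 c2 1).foldl (fun r c => pvAddAt r c s) st.1
      (row, st.2 ++ [row]))
    (List.replicate l (0 : Int), ([] : List (List Int)))).2

def pvMine (point : List Int × List Int) : List (List Int) :=
  pvSweep (point.1.zip point.2)

-- the `for k in range(n-1)` loop of integer_det, with its early `return 0`
def pvDetLoop (M : List (List Int)) (sign prev : Int) (k n : Nat) : Int :=
  if h : k < n - 1 then
    let piv0 :=
      if pvGetM M k k = 0 then
        match (List.range' (k + 1) (n - 1 - k)).find? (fun i => pvGetM M i k != 0) with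
        | some i => some ((M.set k (M.getD i [])).set i (M.getD k []), -sign)  -- M[k],M[i] = M[i],M[k]
        | none => none                                                          -- for…else: return 0
      else some (M, sign)
    match piv0 with
    | none => 0
    | some (M1, sign1) =>
      let M2 := (List.range' (k + 1) (n - 1 - k)).foldl (fun Ma i =>
          pvSetM ((List.range' (k + 1) (n - 1 - k)).foldl (fun Mb j =>
              pvSetM Mb i j (PySem.Int.floordiv
                (pvGetM Mb k k * pvGetM Mb i j - pvGetM Mb i k * pvGetM Mb k j) prev)) Ma)
            i k 0) M1
      pvDetLoop M2 sign1 (pvGetM M2 k k) (k + 1) n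
  else sign * pvGetM M (n - 1) (n - 1)   -- Python raises IndexError when n = 0 (excluded by Pre_)
termination_by n - 1 - k

def pvIntegerDet (mat : List (List Int)) : Int :=
  let n := mat.length
  let M := mat.map (fun row => row)    -- [row[:] for row in mat]
  pvDetLoop M 1 1 0 n

def evaluate_alexander (point : List Int × List Int) (u_val : Int) : Int :=
  let m := pvMine point
  let n := m.length
  -- min(row) raises ValueError on an empty row, i.e. when n = 0 (excluded by Pre_)
  let row_mins := m.map (fun row => (PySem.List.min? row (fun v => v)).getD 0)
  let shifted := (PySem.List.enumerate m).map
    (fun ir => ir.2.map (fun v => v - row_mins.getD ir.1.toNat 0))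
  let mat := shifted.map (fun row => row.map (fun s => u_val ^ s.toNat))  -- u_val**s with s ≥ 0 here
  let det_val := pvIntegerDet mat
  let S := row_mins.sum
  -- u_val**(S+n-1): S+n-1 ≥ 0 under Pre_ (Python leaves int on a negative exponent)
  let numerator := det_val * u_val ^ (S + (n : Int) - 1).toNat
  let denominator := (u_val - 1) ^ (n - 1)
  PySem.Int.floordiv numerator denominator   -- ZeroDivisionError iff u_val = 1 ∧ n ≥ 2 (excluded by Pre_)

-- ===== PORT B =====

def pvPivot (rows : List (List Int)) (sign : Int) : Option (List (List Int) × Int) :=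
  if (rows.headD []).getD 0 0 = 0 then
    match (PySem.List.enumerate rows).find? (fun ir => ir.2.getD 0 0 != 0) with
    | some (i, row) => some ((rows.set 0 row).set i.toNat (rows.headD []), -sign)
        -- enumerate indices are ≥ 0, so .toNat is exact
    | none => none
  else some (rows, sign)

def pvCondense (rows : List (List Int)) (prev : Int) : List (List Int) :=
  let top := rows.headD []
  (rows.drop 1).map (fun row =>
    (List.range' 1 (row.length - 1)).map (fun j =>
      PySem.Int.floordiv (top.getD 0 0 * row.getD j 0 - row.getD 0 0 * top.getD j 0) prev))

-- needed (by name) for pvChio's termination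
theorem pvPivot_some_length {rows rows1 : List (List Int)} {sign sign1 : Int}
    (h : pvPivot rows sign = some (rows1, sign1)) :
    rows1.length = rows.length ∧ rows ≠ [] := by
  unfold pvPivot at h
  split at h
  · rcases hf : (PySem.List.enumerate rows).find? (fun ir => ir.2.getD 0 0 != 0) with _ | ⟨i, row⟩ <;>
      rw [hf] at h
    · exact absurd h (by simp)
    · rcases rows with _ | ⟨r0, rs⟩
      · simp [PySem.List.enumerate] at hf
      · simp only [Option.some.injEq, Prod.mk.injEq] at h
        refine ⟨?_, by simp⟩
        rw [← h.1]; simp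
  · simp only [Option.some.injEq, Prod.mk.injEq] at h
    rcases rows with _ | ⟨r0, rs⟩
    · simp_all [pvPivot]
    · exact ⟨by rw [← h.1], by simp⟩

theorem pvCondense_length (rows : List (List Int)) (prev : Int) :
    (pvCondense rows prev).length = rows.length - 1 := by
  simp [pvCondense]

def pvChio (rows : List (List Int)) (prev sign : Int) : Int :=
  if rows.length = 1 then sign * (rows.headD []).getD 0 0
  else
    match hp : pvPivot rows sign with
    | none => 0
    | some (rows1, sign1) =>
      pvChio (pvCondense rows1 prev) ((rows1.headD []).getD 0 0) sign1
termination_by rows.length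
decreasing_by
  have hpl := pvPivot_some_length hp
  have h1 : rows.length ≠ 1 := by assumption
  have h0 : rows.length ≠ 0 := by simpa using hpl.2
  rw [pvCondense_length, hpl.1]
  omega

def evaluate_alexander_alt (point : List Int × List Int) (u_val : Int) : Int :=
  let pairs := point.1.zip point.2
  let n := pairs.length
  let st := pairs.foldl (fun (st : List Int × List (List Int) × Int) q =>
      let s := (if q.2 > q.1 then (1 : Int) else 0) - (if q.2 < q.1 then 1 else 0)  -- (b>a)-(b<a)
      let row := (PySem.List.pyRange (min q.1 q.2) (max q.1 q.2) 1).foldl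
        (fun r c => pvAddAt r c s) st.1
      let mn := (PySem.List.min? row (fun v => v)).getD 0   -- min(row); n = 0 excluded by Pre_
      (row, st.2.1 ++ [row.map (fun v => u_val ^ (v - mn).toNat)], st.2.2 + mn))
    (List.replicate n (0 : Int), ([] : List (List Int)), (0 : Int))
  let det := pvChio st.2.1 1 1
  PySem.Int.floordiv (det * u_val ^ (st.2.2 + (n : Int) - 1).toNat) ((u_val - 1) ^ (n - 1))

-- ===== PRECONDITION & SPEC =====

-- specification-level value of the sweep matrix entry (i, p): a direct double
-- sum with indicators (the second indicator accounts for Python's negative-index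
-- wraparound `current_row[c]` with -n ≤ c < 0); used only to state Pre_
def pvEnt (pairs : List (Int × Int)) (n : Nat) (i p : Nat) : Int :=
  ((pairs.take (i + 1)).map (fun q =>
    (if q.2 - q.1 > 0 then (1 : Int) else if q.2 - q.1 < 0 then -1 else 0) *
    ((if min q.1 q.2 ≤ (p : Int) ∧ (p : Int) < max q.1 q.2 then 1 else 0) +
     (if min q.1 q.2 ≤ (p : Int) - n ∧ (p : Int) - n < max q.1 q.2 then 1 else 0)))).sum

def pvRowMin (pairs : List (Int × Int)) (n : Nat) (i : Nat) : Int :=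
  (((List.range n).map (fun p => pvEnt pairs n i p)).min?).getD 0

def pvSpecS (pairs : List (Int × Int)) (n : Nat) : Int :=
  ((List.range n).map (fun i => pvRowMin pairs n i)).sum

-- Exactly the inputs where Python A returns an int: at least one pair after zip
-- truncation; every sweep update index in range (IndexError otherwise); u_val = 1
-- only for n = 1 (ZeroDivisionError); final exponent S+n-1 nonnegative (Python
-- otherwise produces a float, not an int).
def Pre_evaluate_alexander (point : List Int × List Int) (u_val : Int) : Prop :=
  let pairs := point.1.zip point.2
  let n := pairs.length
  0 < n ∧
  (∀ q ∈ pairs, min q.1 q.2 < max q.1 q.2 →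
      -(n : Int) ≤ min q.1 q.2 ∧ max q.1 q.2 ≤ (n : Int)) ∧
  (u_val = 1 → n = 1) ∧
  0 ≤ pvSpecS pairs n + (n : Int) - 1

instance (point : List Int × List Int) (u_val : Int) : Decidable (Pre_evaluate_alexander point u_val) := by
  unfold Pre_evaluate_alexander; infer_instance

def pvWitness_evaluate_alexander : (List Int × List Int) × Int := (([0], [1]), 2)

def Spec_evaluate_alexander (point : List Int × List Int) (u_val : Int) (out : Int) : Prop := out = evaluate_alexander_alt point u_val
instance (point : List Int × List Int) (u_val : Int) (out : Int) : Decidable (Spec_evaluate_alexander point u_val out) := by unfold Spec_evaluate_alexander; infer_instance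

-- ===== CLAIM (what is proved, stated in full; the proofs are below) =====
def Claim_equal_evaluate_alexander : Prop := ∀ (point : List Int × List Int) (u_val : Int), Dom_evaluate_alexander point u_val → Pre_evaluate_alexander point u_val → Spec_evaluate_alexander point u_val (evaluate_alexander point u_val)

-- ===== LEMMAS AND PROOFS =====
-- ---------- basic access lemmas ----------

def pvSq (M : List (List Int)) (n : Nat) : Prop :=
  M.length = n ∧ ∀ r ∈ M, r.length = n

theorem pvSq_row {M : List (List Int)} {n a : Nat} (h : pvSq M n) (ha : a < n) :
    (M.getD a []).length = n := by
  have hlen := h.1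
  have : (M.getD a []) ∈ M := by
    rw [List.getD_eq_getElem?_getD, List.getElem?_eq_getElem (by omega : a < M.length)]
    exact List.getElem_mem _
  exact h.2 _ this

theorem pvGetM_setM {M : List (List Int)} {n : Nat} (h : pvSq M n)
    {i j : Nat} (hi : i < n) (hj : j < n) (v : Int) (a b : Nat) :
    pvGetM (pvSetM M i j v) a b = if a = i ∧ b = j then v else pvGetM M a b := by
  have hlen := h.1
  have hrow := pvSq_row h hi
  unfold pvGetM pvSetM
  rw [List.getD_eq_getElem?_getD (l := M.set i _), List.getElem?_set]
  by_cases hai : i = a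
  · subst hai
    rw [if_pos rfl, if_pos (by omega : i < M.length)]
    simp only [Option.getD_some]
    rw [List.getD_eq_getElem?_getD, List.getElem?_set]
    by_cases hbj : j = b
    · subst hbj
      rw [if_pos rfl, if_pos (by omega : j < (M.getD i []).length)]
      simp [List.getD_eq_getElem?_getD]
    · rw [if_neg hbj]
      simp [List.getD_eq_getElem?_getD, Ne.symm hbj]
  · rw [if_neg hai, if_neg (by omega : ¬(a = i ∧ b = j))]
    simp [List.getD_eq_getElem?_getD]

theorem pvSq_setM {M : List (List Int)} {n : Nat} (h : pvSq M n) (i j : Nat) (v : Int) :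
    pvSq (pvSetM M i j v) n := by
  unfold pvSetM
  by_cases hi : i < M.length
  · refine ⟨by simp [h.1], ?_⟩
    intro r hr
    rcases List.mem_or_eq_of_mem_set hr with hmem | rfl
    · exact h.2 _ hmem
    · rw [List.length_set]
      exact pvSq_row h (h.1 ▸ hi)
  · rw [List.set_eq_of_length_le (by omega)]
    exact h

-- tb: the trailing block of M from row/col k on
def pvTb (M : List (List Int)) (k : Nat) : List (List Int) :=
  (M.drop k).map (fun r => r.drop k)

theorem pvTb_getD (M : List (List Int)) (k i : Nat) :
    (pvTb M k).getD i [] = (M.getD (k + i) []).drop k := by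
  unfold pvTb
  rw [List.getD_eq_getElem?_getD, List.getElem?_map, List.getElem?_drop,
    List.getD_eq_getElem?_getD]
  cases h : M[k + i]? <;> simp

theorem pvTb_length (M : List (List Int)) (k : Nat) :
    (pvTb M k).length = M.length - k := by simp [pvTb]

theorem pvHeadD_getD (l : List (List Int)) : l.headD [] = l.getD 0 [] := by
  cases l <;> rfl

theorem pvTb_set {M : List (List Int)} {k j : Nat} (hkj : k ≤ j) (v : List Int) :
    pvTb (M.set j v) k = (pvTb M k).set (j - k) (v.drop k) := by
  unfold pvTb
  rw [List.drop_set, if_neg (by omega), List.map_set]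

-- ---------- find? correspondences ----------

def pvF (r : List Int) : Bool := r.getD 0 0 != 0

theorem pvFindA (M : List (List Int)) (k : Nat) :
    ∀ (L : List (List Int)) (s : Nat),
      (∀ t, t < L.length → pvGetM M (s + t) k = (L.getD t []).getD 0 0) →
      (List.range' s L.length).find? (fun i => pvGetM M i k != 0)
        = (L.findIdx? pvF).map (fun t => s + t) := by
  intro L
  induction L with
  | nil => intro s _; simp
  | cons r rest ih =>
    intro s hag
    rw [List.length_cons, List.range'_succ, List.find?_cons, List.findIdx?_cons]
    have h0 := hag 0 (by simp)
    simp only [Nat.add_zero] at h0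
    by_cases hp : pvF r
    · rw [if_pos hp]
      have hb : (pvGetM M s k != 0) = true := by
        rw [h0]; simpa [pvF] using hp
      rw [hb]; simp
    · rw [if_neg hp]
      have hb : (pvGetM M s k != 0) = false := by
        rw [h0]; simpa [pvF] using hp
      rw [hb]
      rw [ih (s + 1) (fun t ht => by
        have := hag (t + 1) (by simpa using Nat.succ_lt_succ ht)
        simpa [Nat.add_assoc, Nat.add_comm 1 t] using this)]
      cases List.findIdx? pvF rest <;> simp <;> omega

theorem pvFindB (L : List (List Int)) :
    ∀ (s : Int),
      (PySem.List.enumerate L s).find? (fun ir => ir.2.getD 0 0 != 0)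
        = (L.findIdx? pvF).map (fun t : Nat => ((s + (t : Int), L.getD t []) : Int × List Int)) := by
  induction L with
  | nil => intro s; simp [PySem.List.enumerate_nil]
  | cons r rest ih =>
    intro s
    rw [PySem.List.enumerate_cons, List.find?_cons, List.findIdx?_cons]
    by_cases hp : pvF r
    · have hb : ((r.getD 0 0 != 0)) = true := by simpa [pvF] using hp
      simp only [hb, if_pos hp]
      simp
    · have hb : ((r.getD 0 0 != 0)) = false := by simpa [pvF] using hp
      simp only [hb, if_neg hp]
      rw [ih (s + 1)]
      cases List.findIdx? pvF rest with
      | none => simp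
      | some t =>
        simp only [Option.map_some, Option.some.injEq, Prod.mk.injEq]
        refine ⟨by push_cast; ring, rfl⟩

-- list extensionality through getD (out-of-range positions agree on the default)
theorem pvExtD {α : Type} [Inhabited α] (d : α) {l1 l2 : List α}
    (hl : l1.length = l2.length) (h : ∀ t, t < l1.length → l1.getD t d = l2.getD t d) :
    l1 = l2 := by
  apply List.ext_getElem hl
  intro i h1 h2
  have := h i h1
  rwa [List.getD_eq_getElem?_getD, List.getD_eq_getElem?_getD,
    List.getElem?_eq_getElem h1, List.getElem?_eq_getElem h2] at this

theorem pvGetD_drop {α : Type} (l : List α) (k t : Nat) (d : α) :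
    (l.drop k).getD t d = l.getD (k + t) d := by
  simp [List.getD_eq_getElem?_getD, List.getElem?_drop]

theorem pvSq_set {M : List (List Int)} {n : Nat} (h : pvSq M n) {v : List Int}
    (hv : v.length = n) (a : Nat) : pvSq (M.set a v) n := by
  refine ⟨by simp [h.1], ?_⟩
  intro r hr
  rcases List.mem_or_eq_of_mem_set hr with hmem | rfl
  · exact h.2 _ hmem
  · exact hv

-- ---------- elimination characterization ----------

def pvE (M1 : List (List Int)) (k : Nat) (prev : Int) (a b : Nat) : Int :=
  PySem.Int.floordiv (pvGetM M1 k k * pvGetM M1 a b - pvGetM M1 a k * pvGetM M1 k b) prev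

theorem pvInnerAux (n k i : Nat) (prev : Int) (Mc : List (List Int))
    (hki : k < i) (hin : i < n) :
    ∀ (c j0 : Nat), k < j0 → j0 + c ≤ n →
    ∀ Mb, pvSq Mb n →
    (∀ a b, pvGetM Mb a b =
      if a = i ∧ k + 1 ≤ b ∧ b < j0 then pvE Mc k prev i b else pvGetM Mc a b) →
    pvSq ((List.range' j0 c).foldl (fun Mb j => pvSetM Mb i j (PySem.Int.floordiv
        (pvGetM Mb k k * pvGetM Mb i j - pvGetM Mb i k * pvGetM Mb k j) prev)) Mb) n ∧
    ∀ a b, pvGetM ((List.range' j0 c).foldl (fun Mb j => pvSetM Mb i j (PySem.Int.floordiv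
        (pvGetM Mb k k * pvGetM Mb i j - pvGetM Mb i k * pvGetM Mb k j) prev)) Mb) a b =
      if a = i ∧ k + 1 ≤ b ∧ b < j0 + c then pvE Mc k prev i b else pvGetM Mc a b := by
  intro c
  induction c with
  | zero =>
    intro j0 hj0 hle Mb hsqb hinv
    simpa using ⟨hsqb, hinv⟩
  | succ c ih =>
    intro j0 hj0 hle Mb hsqb hinv
    rw [List.range'_succ, List.foldl_cons]
    have hvk : pvGetM Mb k k = pvGetM Mc k k := by
      rw [hinv]; rw [if_neg (by omega)]
    have hvij : pvGetM Mb i j0 = pvGetM Mc i j0 := by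
      rw [hinv]; rw [if_neg (by omega)]
    have hvik : pvGetM Mb i k = pvGetM Mc i k := by
      rw [hinv]; rw [if_neg (by omega)]
    have hvkj : pvGetM Mb k j0 = pvGetM Mc k j0 := by
      rw [hinv]; rw [if_neg (by omega)]
    have hval : PySem.Int.floordiv
        (pvGetM Mb k k * pvGetM Mb i j0 - pvGetM Mb i k * pvGetM Mb k j0) prev
        = pvE Mc k prev i j0 := by
      rw [hvk, hvij, hvik, hvkj]; rfl
    have hset := pvGetM_setM hsqb hin (by omega : j0 < n)
      (PySem.Int.floordiv (pvGetM Mb k k * pvGetM Mb i j0 - pvGetM Mb i k * pvGetM Mb k j0) prev)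
    have hsq' := pvSq_setM hsqb i j0
      (PySem.Int.floordiv (pvGetM Mb k k * pvGetM Mb i j0 - pvGetM Mb i k * pvGetM Mb k j0) prev)
    have := ih (j0 + 1) (by omega) (by omega) _ hsq' (by
      intro a b
      rw [hset a b]
      by_cases hab : a = i ∧ b = j0
      · rw [if_pos hab, if_pos (by omega), hval, hab.2]
      · rw [if_neg hab, hinv a b]
        by_cases h1 : a = i ∧ k + 1 ≤ b ∧ b < j0
        · rw [if_pos h1, if_pos (by omega)]
        · rw [if_neg h1, if_neg (by omega)])
    refine ⟨this.1, fun a b => ?_⟩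
    rw [this.2 a b]
    by_cases h1 : a = i ∧ k + 1 ≤ b ∧ b < j0 + 1 + c
    · rw [if_pos h1, if_pos (by omega)]
    · rw [if_neg h1, if_neg (by omega)]

def pvG (M1 : List (List Int)) (k n : Nat) (prev : Int) (i0 a b : Nat) : Int :=
  if k + 1 ≤ a ∧ a < i0 ∧ k + 1 ≤ b ∧ b < n then pvE M1 k prev a b
  else if k + 1 ≤ a ∧ a < i0 ∧ b = k then 0
  else pvGetM M1 a b

theorem pvG_of_not {M1 : List (List Int)} {k n : Nat} {prev : Int} {i0 a b : Nat}
    (h : ¬(k + 1 ≤ a ∧ a < i0)) : pvG M1 k n prev i0 a b = pvGetM M1 a b := by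
  unfold pvG
  rw [if_neg (by tauto), if_neg (by tauto)]

theorem pvOuterAux (n k : Nat) (prev : Int) (M1 : List (List Int)) (hk : k < n) :
    ∀ (c i0 : Nat), k < i0 → i0 + c ≤ n →
    ∀ Ma, pvSq Ma n →
    (∀ a b, pvGetM Ma a b = pvG M1 k n prev i0 a b) →
    pvSq ((List.range' i0 c).foldl (fun Ma i =>
        pvSetM ((List.range' (k + 1) (n - 1 - k)).foldl (fun Mb j => pvSetM Mb i j
          (PySem.Int.floordiv (pvGetM Mb k k * pvGetM Mb i j - pvGetM Mb i k * pvGetM Mb k j)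
            prev)) Ma) i k 0) Ma) n ∧
    ∀ a b, pvGetM ((List.range' i0 c).foldl (fun Ma i =>
        pvSetM ((List.range' (k + 1) (n - 1 - k)).foldl (fun Mb j => pvSetM Mb i j
          (PySem.Int.floordiv (pvGetM Mb k k * pvGetM Mb i j - pvGetM Mb i k * pvGetM Mb k j)
            prev)) Ma) i k 0) Ma) a b = pvG M1 k n prev (i0 + c) a b := by
  intro c
  induction c with
  | zero =>
    intro i0 hi0 hle Ma hsqa hinv
    simpa using ⟨hsqa, hinv⟩
  | succ c ih =>
    intro i0 hi0 hle Ma hsqa hinv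
    rw [List.range'_succ, List.foldl_cons]
    have hinner := pvInnerAux n k i0 prev Ma hi0 (by omega) (n - 1 - k) (k + 1)
      (by omega) (by omega) Ma hsqa (by
        intro a b; rw [if_neg (by omega)])
    set Mi := (List.range' (k + 1) (n - 1 - k)).foldl (fun Mb j => pvSetM Mb i0 j
      (PySem.Int.floordiv (pvGetM Mb k k * pvGetM Mb i0 j - pvGetM Mb i0 k * pvGetM Mb k j)
        prev)) Ma with hMi
    have hMaE : ∀ b, pvE Ma k prev i0 b = pvE M1 k prev i0 b := by
      intro b
      unfold pvE
      rw [hinv k k, hinv i0 b, hinv i0 k, hinv k b,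
        pvG_of_not (by omega), pvG_of_not (by omega),
        pvG_of_not (by omega), pvG_of_not (by omega)]
    have hsqMi := hinner.1
    have hMiChar : ∀ a b, pvGetM Mi a b =
        if a = i0 ∧ k + 1 ≤ b ∧ b < n then pvE M1 k prev i0 b
        else pvGetM Ma a b := by
      intro a b
      rw [hinner.2 a b]
      by_cases h1 : a = i0 ∧ k + 1 ≤ b ∧ b < k + 1 + (n - 1 - k)
      · rw [if_pos h1, if_pos (by omega), hMaE]
      · rw [if_neg h1, if_neg (by omega)]
    have hset := pvGetM_setM hsqMi (by omega : i0 < n) hk (0 : Int)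
    have hsq2 := pvSq_setM hsqMi i0 k (0 : Int)
    rw [show i0 + (c + 1) = (i0 + 1) + c from by omega]
    exact ih (i0 + 1) (by omega) (by omega) _ hsq2 (by
      intro a b
      rw [hset a b]
      by_cases hab : a = i0 ∧ b = k
      · rw [if_pos hab]
        unfold pvG
        rw [if_neg (by omega), if_pos (by omega)]
      · rw [if_neg hab, hMiChar a b]
        by_cases h1 : a = i0 ∧ k + 1 ≤ b ∧ b < n
        · rw [if_pos h1]
          unfold pvG
          rw [if_pos (by omega), h1.1]
        · rw [if_neg h1, hinv a b]
          unfold pvG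
          by_cases h2 : k + 1 ≤ a ∧ a < i0 ∧ k + 1 ≤ b ∧ b < n
          · rw [if_pos h2, if_pos (by omega)]
          · rw [if_neg h2]
            by_cases h3 : k + 1 ≤ a ∧ a < i0 ∧ b = k
            · rw [if_pos h3, if_neg (by omega), if_pos (by omega)]
            · rw [if_neg h3, if_neg (by omega), if_neg (by omega)])

-- ---------- condensation step equals in-place elimination step ----------

theorem pvGetM_eq (M : List (List Int)) (a b : Nat) :
    (M.getD a []).getD b 0 = pvGetM M a b := rfl

theorem pvCondense_tb (M1 M2 : List (List Int)) (k n : Nat) (prev : Int)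
    (h1 : pvSq M1 n) (h2 : pvSq M2 n) (hk : k + 1 < n)
    (hchar : ∀ a b, pvGetM M2 a b = pvG M1 k n prev n a b) :
    pvTb M2 (k + 1) = pvCondense (pvTb M1 k) prev := by
  have hL2 : (pvTb M2 (k + 1)).length = n - (k + 1) := by
    rw [pvTb_length, h2.1]
  have hL1 : (pvTb M1 k).length = n - k := by
    rw [pvTb_length, h1.1]
  apply pvExtD ([] : List Int)
  · rw [hL2, pvCondense_length, hL1]; omega
  · intro r hr
    rw [hL2] at hr
    -- the r-th condensed row
    have hrow1 : ((pvTb M1 k).drop 1).getD r [] = (M1.getD (k + 1 + r) []).drop k := by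
      rw [pvGetD_drop, pvTb_getD, show k + (1 + r) = k + 1 + r from by omega]
    have htop : (pvTb M1 k).headD [] = (M1.getD k []).drop k := by
      rw [pvHeadD_getD, pvTb_getD, Nat.add_zero]
    have hdl : r < ((pvTb M1 k).drop 1).length := by
      rw [List.length_drop, hL1]; omega
    have hrhs : (pvCondense (pvTb M1 k) prev).getD r [] =
        (List.range' 1 (n - k - 1)).map (fun j =>
          PySem.Int.floordiv
            (pvGetM M1 k k * pvGetM M1 (k + 1 + r) (k + j) -
             pvGetM M1 (k + 1 + r) k * pvGetM M1 k (k + j)) prev) := by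
      unfold pvCondense
      rw [List.getD_eq_getElem?_getD, List.getElem?_map, List.getElem?_eq_getElem hdl]
      simp only [Option.map_some, Option.getD_some]
      have hGr : ((pvTb M1 k).drop 1)[r] = (M1.getD (k + 1 + r) []).drop k := by
        rw [← hrow1, List.getD_eq_getElem?_getD, List.getElem?_eq_getElem hdl]
        rfl
      rw [hGr]
      have hlen3 : ((M1.getD (k + 1 + r) []).drop k).length = n - k := by
        rw [List.length_drop, pvSq_row h1 (by omega)]
      rw [hlen3]
      congr 1
      funext j
      rw [htop, pvGetD_drop, pvGetD_drop, pvGetD_drop, pvGetD_drop,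
        pvGetM_eq, pvGetM_eq, pvGetM_eq, pvGetM_eq, Nat.add_zero]
    rw [hrhs, pvTb_getD]
    apply pvExtD (0 : Int)
    · rw [List.length_drop, pvSq_row h2 (by omega), List.length_map, List.length_range']
      omega
    · intro t ht
      rw [List.length_drop, pvSq_row h2 (by omega)] at ht
      rw [pvGetD_drop, pvGetM_eq, hchar]
      rw [List.getD_eq_getElem?_getD, List.getElem?_map,
        List.getElem?_eq_getElem (by rw [List.length_range']; omega :
          t < (List.range' 1 (n - k - 1)).length)]
      simp only [Option.map_some, Option.getD_some, List.getElem_range', Nat.one_mul]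
      unfold pvG
      rw [if_pos (by omega)]
      unfold pvE
      rw [show k + (1 + t) = k + 1 + t from by omega]

-- ---------- the common tail of one elimination step ----------

theorem pvStepCommon (d k n : Nat) (prev sign1 : Int) (M1 : List (List Int))
    (ih : ∀ (k : Nat) (M : List (List Int)) (sign prev : Int) (n : Nat),
      n = k + 1 + d → pvSq M n → pvDetLoop M sign prev k n = pvChio (pvTb M k) prev sign)
    (hn : n = k + 1 + (d + 1)) (hsq1 : pvSq M1 n) :
    pvDetLoop ((List.range' (k + 1) (n - 1 - k)).foldl (fun Ma i =>
        pvSetM ((List.range' (k + 1) (n - 1 - k)).foldl (fun Mb j => pvSetM Mb i j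
          (PySem.Int.floordiv (pvGetM Mb k k * pvGetM Mb i j - pvGetM Mb i k * pvGetM Mb k j)
            prev)) Ma) i k 0) M1) sign1
      (pvGetM ((List.range' (k + 1) (n - 1 - k)).foldl (fun Ma i =>
        pvSetM ((List.range' (k + 1) (n - 1 - k)).foldl (fun Mb j => pvSetM Mb i j
          (PySem.Int.floordiv (pvGetM Mb k k * pvGetM Mb i j - pvGetM Mb i k * pvGetM Mb k j)
            prev)) Ma) i k 0) M1) k k) (k + 1) n
    = pvChio (pvCondense (pvTb M1 k) prev) (((pvTb M1 k).headD []).getD 0 0) sign1 := by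
  have hout := pvOuterAux n k prev M1 (by omega) (n - 1 - k) (k + 1) (by omega) (by omega)
    M1 hsq1 (by intro a b; rw [pvG_of_not (by omega)])
  set M2 := (List.range' (k + 1) (n - 1 - k)).foldl (fun Ma i =>
      pvSetM ((List.range' (k + 1) (n - 1 - k)).foldl (fun Mb j => pvSetM Mb i j
        (PySem.Int.floordiv (pvGetM Mb k k * pvGetM Mb i j - pvGetM Mb i k * pvGetM Mb k j)
          prev)) Ma) i k 0) M1 with hM2
  have hsq2 : pvSq M2 n := hout.1
  have hchar : ∀ a b, pvGetM M2 a b = pvG M1 k n prev n a b := by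
    intro a b
    rw [hout.2 a b, show k + 1 + (n - 1 - k) = n from by omega]
  have hkk : pvGetM M2 k k = pvGetM M1 k k := by
    rw [hchar, pvG_of_not (by omega)]
  have htop : ((pvTb M1 k).headD []).getD 0 0 = pvGetM M1 k k := by
    rw [pvHeadD_getD, pvTb_getD, Nat.add_zero, pvGetD_drop, Nat.add_zero, pvGetM_eq]
  rw [ih (k + 1) M2 sign1 (pvGetM M2 k k) n (by omega) hsq2,
    pvCondense_tb M1 M2 k n prev hsq1 hsq2 (by omega) hchar, hkk, htop]

-- ---------- main: in-place Bareiss loop = recursive condensation ----------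

theorem pvMain : ∀ (d k : Nat) (M : List (List Int)) (sign prev : Int) (n : Nat),
    n = k + 1 + d → pvSq M n →
    pvDetLoop M sign prev k n = pvChio (pvTb M k) prev sign := by
  intro d
  induction d with
  | zero =>
    intro k M sign prev n hn hsq
    rw [pvDetLoop, dif_neg (by omega : ¬ k < n - 1), pvChio,
      if_pos (by rw [pvTb_length, hsq.1]; omega)]
    rw [pvHeadD_getD, pvTb_getD, Nat.add_zero, pvGetD_drop, Nat.add_zero, pvGetM_eq,
      show n - 1 = k from by omega]
  | succ d ih =>
    intro k M sign prev n hn hsq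
    have hk1 : k < n - 1 := by omega
    have hlen : (pvTb M k).length = n - k := by rw [pvTb_length, hsq.1]
    rw [pvDetLoop, dif_pos hk1, pvChio]
    rw [if_neg (show ¬(pvTb M k).length = 1 by rw [hlen]; omega)]
    have htop0 : ((pvTb M k).headD []).getD 0 0 = pvGetM M k k := by
      rw [pvHeadD_getD, pvTb_getD, Nat.add_zero, pvGetD_drop, Nat.add_zero, pvGetM_eq]
    by_cases hz : pvGetM M k k = 0
    · -- pivot is zero: both sides search for a pivot row
      obtain ⟨r0, rest, hre⟩ := List.exists_cons_of_ne_nil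
        (by intro hnil; rw [hnil] at hlen; simp at hlen; omega : pvTb M k ≠ [])
      have hr0 : r0 = (pvTb M k).headD [] := by rw [hre]; rfl
      have hrest : rest = (pvTb M k).drop 1 := by rw [hre]; rfl
      have hrestlen : rest.length = n - 1 - k := by
        rw [hrest, List.length_drop, hlen]; omega
      have hFr0 : pvF r0 = false := by
        unfold pvF
        rw [hr0, htop0]
        simpa using hz
      have hfindIdx : (pvTb M k).findIdx? pvF = (rest.findIdx? pvF).map (· + 1) := by
        rw [hre, List.findIdx?_cons, hFr0]
        simp
      have hfa : (List.range' (k + 1) (n - 1 - k)).find? (fun i => pvGetM M i k != 0)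
          = (rest.findIdx? pvF).map (fun t => k + 1 + t) := by
        rw [show n - 1 - k = rest.length from hrestlen.symm]
        exact pvFindA M k rest (k + 1) (by
          intro t htl
          rw [hrest, pvGetD_drop, pvTb_getD, pvGetD_drop, pvGetM_eq,
            show k + (1 + t) = k + 1 + t from by omega]
          simp)
      have hfb := pvFindB (pvTb M k) 0
      rw [hfindIdx] at hfb
      have hpivstep : pvPivot (pvTb M k) sign =
          match rest.findIdx? pvF with
          | none => none
          | some t => some (((pvTb M k).set 0 ((pvTb M k).getD (t + 1) [])).set (t + 1)
              ((pvTb M k).headD []), -sign) := by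
        unfold pvPivot
        rw [if_pos (by rw [htop0]; exact hz), hfb]
        cases hfi : rest.findIdx? pvF with
        | none => simp
        | some t => simp
      rw [if_pos hz, hfa, hpivstep]
      cases hfi : rest.findIdx? pvF with
      | none => simp
      | some t =>
        simp only [Option.map_some]
        have ht : t < rest.length := (List.findIdx?_eq_some_iff_findIdx_eq.1 hfi).1
        have hi_lt : k + 1 + t < n := by omega
        have hsq1 : pvSq ((M.set k (M.getD (k + 1 + t) [])).set (k + 1 + t) (M.getD k [])) n := by
          apply pvSq_set (pvSq_set hsq (pvSq_row hsq hi_lt) k) (pvSq_row hsq (by omega))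
        have htb1 : pvTb ((M.set k (M.getD (k + 1 + t) [])).set (k + 1 + t) (M.getD k [])) k
            = ((pvTb M k).set 0 ((pvTb M k).getD (t + 1) [])).set (t + 1)
              ((pvTb M k).headD []) := by
          rw [pvTb_set (by omega), pvTb_set (by omega),
            show k + 1 + t - k = t + 1 from by omega, Nat.sub_self]
          rw [pvTb_getD, show k + (t + 1) = k + 1 + t from by omega, pvHeadD_getD,
            pvTb_getD]
          simp
        rw [← htb1]
        exact pvStepCommon d k n prev (-sign)
          ((M.set k (M.getD (k + 1 + t) [])).set (k + 1 + t) (M.getD k [])) ih hn hsq1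
    · -- pivot already nonzero
      have hpivstep : pvPivot (pvTb M k) sign = some (pvTb M k, sign) := by
        unfold pvPivot
        rw [if_neg (by rw [htop0]; exact hz)]
      rw [if_neg hz, hpivstep]
      exact pvStepCommon d k n prev sign M ih hn hsq

-- ---------- pipeline: fused single pass = sweep + three comprehensions ----------

theorem pvSgn_eq (a b : Int) :
    ((if b > a then (1 : Int) else 0) - (if b < a then 1 else 0)) = pvSgn (b - a) := by
  unfold pvSgn
  rcases lt_trichotomy a b with h | h | h <;>
    · split_ifs <;> omega

theorem pvAddAt_length (r : List Int) (c s : Int) :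
    (pvAddAt r c s).length = r.length := by
  simp [pvAddAt, PySem.List.length_pySetD]

theorem pvRowFold_length (s : Int) (cs : List Int) :
    ∀ r : List Int, (cs.foldl (fun r c => pvAddAt r c s) r).length = r.length := by
  induction cs with
  | nil => intro r; rfl
  | cons c cs ih => intro r; rw [List.foldl_cons, ih, pvAddAt_length]

-- the two fold bodies, named (proof-side only; definitionally equal to the ports' lambdas)
def pvAStep : (List Int × List (List Int)) → (Int × Int) → (List Int × List (List Int)) :=
  fun st pair =>
    ((PySem.List.pyRange (min pair.1 pair.2) (max pair.1 pair.2) 1).foldl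
        (fun r c => pvAddAt r c (pvSgn (pair.2 - pair.1))) st.1,
     st.2 ++ [(PySem.List.pyRange (min pair.1 pair.2) (max pair.1 pair.2) 1).foldl
        (fun r c => pvAddAt r c (pvSgn (pair.2 - pair.1))) st.1])

def pvMn (row : List Int) : Int := (PySem.List.min? row (fun v => v)).getD 0

def pvGrow (u_val : Int) (row : List Int) : List Int :=
  row.map (fun v => u_val ^ (v - pvMn row).toNat)

def pvBStep (u_val : Int) : (List Int × List (List Int) × Int) → (Int × Int) →
    (List Int × List (List Int) × Int) :=
  fun st q =>
    (((PySem.List.pyRange (min q.1 q.2) (max q.1 q.2) 1).foldl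
        (fun r c => pvAddAt r c ((if q.2 > q.1 then (1 : Int) else 0) -
          (if q.2 < q.1 then 1 else 0))) st.1),
     st.2.1 ++ [pvGrow u_val (((PySem.List.pyRange (min q.1 q.2) (max q.1 q.2) 1).foldl
        (fun r c => pvAddAt r c ((if q.2 > q.1 then (1 : Int) else 0) -
          (if q.2 < q.1 then 1 else 0))) st.1))],
     st.2.2 + pvMn (((PySem.List.pyRange (min q.1 q.2) (max q.1 q.2) 1).foldl
        (fun r c => pvAddAt r c ((if q.2 > q.1 then (1 : Int) else 0) -
          (if q.2 < q.1 then 1 else 0))) st.1)))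

theorem pvSweepFold_len (ps : List (Int × Int)) :
    ∀ (st : List Int × List (List Int)),
      ((ps.foldl pvAStep st).2).length = st.2.length + ps.length := by
  induction ps with
  | nil => intro st; simp
  | cons p ps ih =>
    intro st
    rw [List.foldl_cons, ih]
    simp [pvAStep]
    omega

theorem pvSweepFold_rows (ps : List (Int × Int)) :
    ∀ (st : List Int × List (List Int)) (L : Nat), st.1.length = L →
      (∀ r ∈ st.2, r.length = L) →
      ∀ r ∈ (ps.foldl pvAStep st).2, r.length = L := by
  induction ps with
  | nil => intro st L h1 h2; exact h2
  | cons p ps ih =>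
    intro st L h1 h2
    rw [List.foldl_cons]
    refine ih _ L (by unfold pvAStep; rw [pvRowFold_length]; exact h1) ?_
    intro r hr
    rcases List.mem_append.1 hr with h | h
    · exact h2 _ h
    · rw [List.mem_singleton.1 h, pvRowFold_length]
      exact h1

-- B's fold carries the A-fold's matrix mapped through pvGrow and the running min-sum
theorem pvFuse (u_val : Int) (ps : List (Int × Int)) :
    ∀ (r0 : List Int) (rows0 : List (List Int)),
      ps.foldl (pvBStep u_val) (r0, rows0.map (pvGrow u_val), (rows0.map pvMn).sum)
      = ((ps.foldl pvAStep (r0, rows0)).1,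
         ((ps.foldl pvAStep (r0, rows0)).2).map (pvGrow u_val),
         (((ps.foldl pvAStep (r0, rows0)).2).map pvMn).sum) := by
  induction ps with
  | nil => intro r0 rows0; rfl
  | cons q ps ih =>
    intro q0 rows0
    rw [List.foldl_cons, List.foldl_cons]
    have hstep : pvBStep u_val (q0, rows0.map (pvGrow u_val), (rows0.map pvMn).sum) q
        = ((pvAStep (q0, rows0) q).1,
           ((pvAStep (q0, rows0) q).2).map (pvGrow u_val),
           (((pvAStep (q0, rows0) q).2).map pvMn).sum) := by
      unfold pvBStep pvAStep
      rw [pvSgn_eq q.1 q.2]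
      simp only [List.map_append, List.sum_append]
      simp
    rw [hstep, ih]

-- enumerate/shift/power comprehensions collapse to one map
theorem pvMatEq (u_val : Int) (m : List (List Int)) :
    ((PySem.List.enumerate m).map (fun ir => ir.2.map (fun v => v -
        (m.map (fun row => (PySem.List.min? row (fun v => v)).getD 0)).getD ir.1.toNat 0))).map
      (fun row => row.map (fun s => u_val ^ s.toNat))
    = m.map (fun row => row.map (fun v => u_val ^
        (v - (PySem.List.min? row (fun v => v)).getD 0).toNat)) := by
  apply List.ext_getElem
  · simp [PySem.List.length_enumerate]
  · intro i h1 h2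
    have hi : i < m.length := by simpa using h2
    rw [List.getElem_map, List.getElem_map, List.getElem_map]
    rw [PySem.List.getElem_enumerate]
    simp only [List.map_map]
    have hmin : (m.map (fun row => (PySem.List.min? row (fun v => v)).getD 0)).getD
        ((0 + (i : Int)).toNat) 0 = (PySem.List.min? (m[i]'hi) (fun v => v)).getD 0 := by
      rw [show ((0 + (i : Int)).toNat) = i by omega, List.getD_eq_getElem?_getD,
        List.getElem?_map, List.getElem?_eq_getElem hi]
      rfl
    rw [hmin]
    rfl

theorem pvTb_zero (M : List (List Int)) : pvTb M 0 = M := by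
  simp [pvTb]

theorem pv_final (point : List Int × List Int) (u_val : Int)
    (hn : 0 < (point.1.zip point.2).length) :
    evaluate_alexander point u_val = evaluate_alexander_alt point u_val := by
  set ps := point.1.zip point.2 with hps
  set n := ps.length with hnn
  set m : List (List Int) := (ps.foldl pvAStep (List.replicate n (0 : Int),
    ([] : List (List Int)))).2 with hm
  have hmlen : m.length = n := by
    rw [hm, pvSweepFold_len]; simp [hnn]
  have hrows : ∀ r ∈ m, r.length = n := by
    intro r hr
    exact pvSweepFold_rows ps (List.replicate n (0 : Int), ([] : List (List Int))) n
      (by simp) (by simp) r hr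
  -- B side, with the fold fused back into the A-fold image
  have hBf := pvFuse u_val ps (List.replicate n (0 : Int)) []
  simp only [List.map_nil, List.sum_nil] at hBf
  have hB : evaluate_alexander_alt point u_val =
      PySem.Int.floordiv
        ((pvChio ((ps.foldl (pvBStep u_val) (List.replicate n (0 : Int),
            ([] : List (List Int)), (0 : Int))).2.1) 1 1) *
          u_val ^ (((ps.foldl (pvBStep u_val) (List.replicate n (0 : Int),
            ([] : List (List Int)), (0 : Int))).2.2) + (n : Int) - 1).toNat)
        ((u_val - 1) ^ (n - 1)) := rfl
  rw [hB, hBf]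
  -- A side
  have hA : evaluate_alexander point u_val =
      PySem.Int.floordiv
        ((pvDetLoop ((((PySem.List.enumerate m).map (fun ir => ir.2.map (fun v => v -
              (m.map (fun row => (PySem.List.min? row (fun v => v)).getD 0)).getD
                ir.1.toNat 0))).map
            (fun row => row.map (fun s => u_val ^ s.toNat))).map (fun row => row)) 1 1 0
          (((PySem.List.enumerate m).map (fun ir => ir.2.map (fun v => v -
              (m.map (fun row => (PySem.List.min? row (fun v => v)).getD 0)).getD
                ir.1.toNat 0))).map
            (fun row => row.map (fun s => u_val ^ s.toNat))).length) *
          u_val ^ (((m.map (fun row => (PySem.List.min? row (fun v => v)).getD 0)).sum) +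
            (m.length : Int) - 1).toNat)
        ((u_val - 1) ^ (m.length - 1)) := rfl
  rw [hA, pvMatEq u_val m]
  have hgrow : m.map (fun row => row.map (fun v => u_val ^
      (v - (PySem.List.min? row (fun v => v)).getD 0).toNat)) = m.map (pvGrow u_val) := rfl
  have hmn : (m.map (fun row => (PySem.List.min? row (fun v => v)).getD 0)) = m.map pvMn := rfl
  rw [hgrow, hmn, List.map_id', List.length_map, hmlen]
  -- the determinant itself
  have hsqmat : pvSq (m.map (pvGrow u_val)) n := by
    refine ⟨by rw [List.length_map, hmlen], ?_⟩
    intro r hr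
    rcases List.mem_map.1 hr with ⟨row, hrow, rfl⟩
    rw [pvGrow, List.length_map]
    exact hrows _ hrow
  rw [pvMain (n - 1) 0 (m.map (pvGrow u_val)) 1 1 n (by omega) hsqmat, pvTb_zero]

-- ===== VERDICT (by name: the statement is the Claim_ definition above) =====
theorem evaluate_alexander_spec : Claim_equal_evaluate_alexander := by
  intro point u_val hdom hpre
  unfold Spec_evaluate_alexander
  exact pv_final point u_val hpre.1
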